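-- pv_equiv track=rewrite | github.com/Chrisk1905/AdventOfCode2022 | day9/part1.py | touching
-- ===== SOURCE A (Python) =====
-- touching_deltas = [(1,0), (-1,0), (0,1), (0,-1), (1,1), (-1,1), (1,-1), (-1,-1)]
--
-- def touching(H: list[int], T: list[int])->bool:
--     if T[0] == H[0] and T[1] == H[1]:
--         return True
--
--     for delta in touching_deltas:
--         dH = [0,0]
--         dH[0] = H[0] + delta[0]
--         dH[1] = H[1] + delta[1]
--         if T == dH:
--             return True
--
--     return False
-- ===== SOURCE B (Python) =====
-- def touching(H: list[int], T: list[int]) -> bool: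
--     if T[0] == H[0] and T[1] == H[1]:
--         return True
--     return len(T) == 2 and abs(H[0] - T[0]) <= 1 and abs(H[1] - T[1]) <= 1
-- ===== Notes on version B (the rewrite author's own statement) =====
-- stated objective: simpler
-- what changed: Replaces the loop over the 8 neighbour offsets (building a candidate list per offset and comparing it to T) with a closed-form Chebyshev-distance test (both coordinate differences have absolute value at most 1), guarded by len(T)==2 to keep A's list-equality semantics for longer T.
import Mathlib
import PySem

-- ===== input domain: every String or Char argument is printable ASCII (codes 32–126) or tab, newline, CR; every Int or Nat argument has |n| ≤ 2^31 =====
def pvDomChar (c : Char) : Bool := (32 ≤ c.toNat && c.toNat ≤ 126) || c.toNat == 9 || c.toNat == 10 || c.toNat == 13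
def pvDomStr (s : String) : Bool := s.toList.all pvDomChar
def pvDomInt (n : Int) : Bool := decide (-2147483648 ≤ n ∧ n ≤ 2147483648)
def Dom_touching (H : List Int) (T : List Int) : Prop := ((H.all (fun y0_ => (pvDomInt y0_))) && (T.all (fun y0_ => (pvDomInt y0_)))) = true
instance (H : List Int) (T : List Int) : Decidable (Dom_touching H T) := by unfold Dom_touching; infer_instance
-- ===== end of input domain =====

-- B replaces A's loop over the 8 neighbour offsets with a closed-form Chebyshev-distance
-- test; equivalence is proved on every input where A returns (Pre_ excludes A's IndexErrors).

-- ===== PORT A =====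
def touching_deltas : List (Int × Int) :=
  [(1,0), (-1,0), (0,1), (0,-1), (1,1), (-1,1), (1,-1), (-1,-1)]

-- the for-loop with early return; H[0]/H[1] exist on every input Pre_ admits
def touchingLoop (H : List Int) (T : List Int) : List (Int × Int) → Bool
  | [] => false
  | delta :: rest =>
    let dH : List Int := [PySem.List.pyGetD H 0 0 + delta.1, PySem.List.pyGetD H 1 0 + delta.2]
    if T = dH then true else touchingLoop H T rest

def touching (H : List Int) (T : List Int) : Bool :=
  -- 'T[0] == H[0] and T[1] == H[1]' — short-circuit; indices valid under Pre_
  if PySem.List.pyGetD T 0 0 = PySem.List.pyGetD H 0 0 ∧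
     PySem.List.pyGetD T 1 0 = PySem.List.pyGetD H 1 0 then true
  else touchingLoop H T touching_deltas

-- ===== PORT B =====
def touching_alt (H : List Int) (T : List Int) : Bool :=
  if PySem.List.pyGetD T 0 0 = PySem.List.pyGetD H 0 0 ∧
     PySem.List.pyGetD T 1 0 = PySem.List.pyGetD H 1 0 then true
  else (T.length = 2 : Bool)
       && ((PySem.List.pyGetD H 0 0 - PySem.List.pyGetD T 0 0).natAbs ≤ 1 : Bool)
       && ((PySem.List.pyGetD H 1 0 - PySem.List.pyGetD T 1 0).natAbs ≤ 1 : Bool)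

-- ===== PRECONDITION & SPEC =====
-- Pre_ excludes exactly the inputs where A raises IndexError: H shorter than 2,
-- empty T, or a length-1 T whose single entry equals H[0] (then A reads T[1]).
def Pre_touching (H : List Int) (T : List Int) : Prop :=
  2 ≤ H.length ∧ 1 ≤ T.length ∧
    (2 ≤ T.length ∨ PySem.List.pyGetD T 0 0 ≠ PySem.List.pyGetD H 0 0)
instance (H : List Int) (T : List Int) : Decidable (Pre_touching H T) := by
  unfold Pre_touching; infer_instance

def pvWitness_touching : List Int × List Int := ([3, 4], [2, 5])

def Spec_touching (H : List Int) (T : List Int) (out : Bool) : Prop := out = touching_alt H T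
instance (H : List Int) (T : List Int) (out : Bool) : Decidable (Spec_touching H T out) := by
  unfold Spec_touching; infer_instance

-- ===== CLAIM (what is proved, stated in full; the proofs are below) =====
def Claim_equal_touching : Prop := ∀ (H : List Int) (T : List Int), Dom_touching H T → Pre_touching H T → Spec_touching H T (touching H T)

-- ===== LEMMAS AND PROOFS =====

theorem pyGetD0 (a : Int) (l : List Int) : PySem.List.pyGetD (a :: l) 0 0 = a :=
  PySem.List.pyGetD_zero_cons a l 0

theorem pyGetD1 (a b : Int) (l : List Int) : PySem.List.pyGetD (a :: b :: l) 1 0 = b := by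
  simp [PySem.List.pyGetD, PySem.List.pyGet?, PySem.List.pyIdx?]

-- ===== VERDICT (by name: the statement is the Claim_ definition above) =====
theorem touching_spec : Claim_equal_touching := by
  intro H T _ hpre
  obtain ⟨hH, hT, hT2⟩ := hpre
  unfold Spec_touching
  match H, T with
  | h0 :: h1 :: hr, t0 :: tr =>
    simp only [touching, touching_alt, touchingLoop, touching_deltas, pyGetD0, pyGetD1]
    match tr with
    | [] =>
      simp only [pyGetD0, List.length_cons, List.length_nil] at hT2 ⊢
      have ht0 : t0 ≠ h0 := by
        rcases hT2 with h | h
        · omega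
        · exact h
      simp [PySem.List.pyGetD, PySem.List.pyGet?, PySem.List.pyIdx?, ht0]
    | t1 :: tr' =>
      simp only [pyGetD0, pyGetD1, List.length_cons]
      match tr' with
      | [] =>
        clear hT hT2 hH
        split_ifs <;>
          simp_all only [List.cons.injEq, and_true, not_and, Bool.true_eq, Bool.false_eq,
            Bool.and_eq_true, Bool.and_eq_false_iff, decide_eq_true_eq,
            decide_eq_false_iff_not, not_le, not_true_eq_false, not_false_eq_true,
            true_and, and_true, List.length_nil] <;> omega
      | t2 :: tr'' =>
        clear hT hT2 hH
        have hne : ∀ a b : Int, (t0 :: t1 :: t2 :: tr'' : List Int) ≠ [a, b] := by simp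
        have hlen : ¬((t0 :: t1 :: t2 :: tr'').length = 2) := by simp
        simp only [hne, ite_false]
        split_ifs
        · rfl
        · simp
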